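-- pv_equiv track=rewrite | github.com/firas357952/france-ioi | Niveau_3/Tableaux avancés/Carré_magique.py | C3
-- ===== SOURCE A (Python) =====
-- def C3(N, Matrix):
--     s0 = 0
--     for i in range(N):
--         s0 += Matrix[i][0]
--     for j in range(1, N):
--         s = 0
--         for i in range(N):
--             s += Matrix[i][j]
--         if s != s0:
--             return (None, False)
--     return (s0, True)
-- ===== SOURCE B (Python) =====
-- def C3(N, Matrix):
--     # Row-major single pass: maintain a running vector of column sums,
--     # updating all N entries from each row in turn (transposed traversal
--     # order relative to A), then reduce with min == max.
--     sums = [0] * N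
--     for i in range(N):
--         row = Matrix[i]
--         sums = [sums[j] + row[j] for j in range(N)]
--     if N <= 0:
--         return (0, True)
--     if min(sums) == max(sums):
--         return (sums[0], True)
--     return (None, False)
-- ===== Notes on version B (the rewrite author's own statement) =====
-- stated objective: alternative
-- what changed: B traverses the matrix row-major in a single pass, maintaining a running vector of all N column sums updated from each whole row, then decides with a min==max reduction; A runs N separate column-major sum loops with an early exit on the first mismatch.
-- outside the precondition, e.g. on C3(3, [[1, 0, 0], [0, 0, 0], [0, 0]]): A returns (None, False), B raises IndexError
import Mathlib
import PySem

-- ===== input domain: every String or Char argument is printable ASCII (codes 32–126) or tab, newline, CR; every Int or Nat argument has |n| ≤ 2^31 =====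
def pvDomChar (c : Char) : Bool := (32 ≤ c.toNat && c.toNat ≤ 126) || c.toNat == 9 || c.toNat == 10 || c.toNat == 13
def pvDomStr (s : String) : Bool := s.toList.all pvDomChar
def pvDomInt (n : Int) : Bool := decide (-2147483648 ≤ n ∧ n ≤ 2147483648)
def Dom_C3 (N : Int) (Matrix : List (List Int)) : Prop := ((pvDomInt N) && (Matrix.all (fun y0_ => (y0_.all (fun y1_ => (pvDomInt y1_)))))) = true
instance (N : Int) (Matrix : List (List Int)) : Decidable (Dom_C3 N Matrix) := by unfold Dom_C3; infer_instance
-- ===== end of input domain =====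

-- B traverses the matrix row-major in one pass, maintaining a running vector of all N column
-- sums updated from each whole row, then decides with a min==max reduction; A runs N separate
-- column-major sum loops with an early exit. Same O(N^2) cost, different traversal.

-- ===== PORT A =====
-- sum of column j over rows 0..N-1; indexing via pyGetD (Pre_C3 keeps every access in range)
def pvColSumA (N : Int) (Matrix : List (List Int)) (j : Int) : Int :=
  (PySem.List.pyRange 0 N 1).foldl
    (fun s i => s + PySem.List.pyGetD (PySem.List.pyGetD Matrix i []) j 0) 0

-- the 'for j in range(1, N)' loop with its early return
def pvLoopA (N : Int) (Matrix : List (List Int)) (s0 : Int) : List Int → Option Int × Bool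
  | [] => (some s0, true)
  | j :: js =>
    let s := pvColSumA N Matrix j
    if s ≠ s0 then (none, false) else pvLoopA N Matrix s0 js

def C3 (N : Int) (Matrix : List (List Int)) : Option Int × Bool :=
  let s0 := pvColSumA N Matrix 0
  pvLoopA N Matrix s0 (PySem.List.pyRange 1 N 1)

-- ===== PORT B =====
-- one row's update of the running column-sum vector: [sums[j] + row[j] for j in range(N)]
def pvAddRow (N : Int) (sums row : List Int) : List Int :=
  (PySem.List.pyRange 0 N 1).map
    (fun j => PySem.List.pyGetD sums j 0 + PySem.List.pyGetD row j 0)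

-- the row-major pass: sums = [0]*N; for i in range(N): sums = pvAddRow(N, sums, Matrix[i])
def pvRowPass (N : Int) (Matrix : List (List Int)) : List Int :=
  (PySem.List.pyRange 0 N 1).foldl
    (fun sums i => pvAddRow N sums (PySem.List.pyGetD Matrix i []))
    (PySem.List.pyRepeat [0] N)

def C3_alt (N : Int) (Matrix : List (List Int)) : Option Int × Bool :=
  let sums := pvRowPass N Matrix
  if N ≤ 0 then (some 0, true)
  else if PySem.List.min? sums (fun x => x) = PySem.List.max? sums (fun x => x)
       then (some (PySem.List.pyGetD sums 0 0), true)
       else (none, false)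

-- ===== PRECONDITION & SPEC =====
-- Pre_C3 excludes the ragged matrices on which A happens to return (None, False) at an early
-- mismatching column before ever indexing a too-short later row, while B's full row pass
-- raises IndexError there; all other inputs where A returns normally are admitted.
def Pre_C3 (N : Int) (Matrix : List (List Int)) : Prop :=
  0 < N → (N ≤ Matrix.length ∧ ∀ row ∈ Matrix.take N.toNat, N ≤ row.length)
instance (N : Int) (Matrix : List (List Int)) : Decidable (Pre_C3 N Matrix) := by
  unfold Pre_C3; infer_instance

def pvWitness_C3 : Int × List (List Int) := (2, [[1, 2], [3, 4]])

def Spec_C3 (N : Int) (Matrix : List (List Int)) (out : Option Int × Bool) : Prop := out = C3_alt N Matrix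
instance (N : Int) (Matrix : List (List Int)) (out : Option Int × Bool) : Decidable (Spec_C3 N Matrix out) := by unfold Spec_C3; infer_instance

-- ===== CLAIM =====
def Claim_equal_C3 : Prop := ∀ (N : Int) (Matrix : List (List Int)), Dom_C3 N Matrix → Pre_C3 N Matrix → Spec_C3 N Matrix (C3 N Matrix)

-- ===== LEMMAS AND PROOFS =====

-- A's early-return loop is the all-equal check over the remaining columns
theorem pvLoopA_eq_all (N : Int) (Matrix : List (List Int)) (s0 : Int) (js : List Int) :
    pvLoopA N Matrix s0 js =
      (if js.all (fun j => pvColSumA N Matrix j == s0) then (some s0, true) else (none, false)) := by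
  induction js with
  | nil => simp [pvLoopA]
  | cons j js ih =>
    simp only [pvLoopA, List.all_cons, ih]
    by_cases h : pvColSumA N Matrix j = s0 <;> simp [h]

-- pull an initial accumulator out of a running-sum fold
theorem foldl_add_init (g : Int → Int) (L : List Int) (c : Int) :
    L.foldl (fun s i => s + g i) c = c + L.foldl (fun s i => s + g i) 0 := by
  induction L generalizing c with
  | nil => simp
  | cons i L ih => simp only [List.foldl_cons]; rw [ih, ih (0 + g i)]; ring_nf

-- exchange of traversal order: folding row updates over a column-sum-shaped vector
-- adds the column sums over those rows, pointwise
theorem rowfold_exchange (N : Int) (Matrix : List (List Int)) (L : List Int) (f : Int → Int) :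
    L.foldl (fun sums i => pvAddRow N sums (PySem.List.pyGetD Matrix i []))
        ((PySem.List.pyRange 0 N 1).map f)
      = (PySem.List.pyRange 0 N 1).map
          (fun j => f j + L.foldl
            (fun s i => s + PySem.List.pyGetD (PySem.List.pyGetD Matrix i []) j 0) 0) := by
  induction L generalizing f with
  | nil => simp
  | cons i L ih =>
    simp only [List.foldl_cons]
    have hstep : pvAddRow N ((PySem.List.pyRange 0 N 1).map f) (PySem.List.pyGetD Matrix i [])
        = (PySem.List.pyRange 0 N 1).map
            (fun j => f j + PySem.List.pyGetD (PySem.List.pyGetD Matrix i []) j 0) := by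
      unfold pvAddRow
      apply List.map_congr_left
      intro j hj
      rw [PySem.List.pyGetD_map_pyRange_of_nonneg f N j 0
            ((PySem.List.mem_pyRange_one).1 hj).1 ((PySem.List.mem_pyRange_one).1 hj).2]
    rw [hstep, ih]
    apply List.map_congr_left
    intro j _
    rw [foldl_add_init (fun i' => PySem.List.pyGetD (PySem.List.pyGetD Matrix i' []) j 0) L
          (0 + PySem.List.pyGetD (PySem.List.pyGetD Matrix i []) j 0)]
    ring_nf

-- the row-major pass computes exactly the list of column sums
theorem pvRowPass_eq_colSums (N : Int) (Matrix : List (List Int)) :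
    pvRowPass N Matrix = (PySem.List.pyRange 0 N 1).map (pvColSumA N Matrix) := by
  unfold pvRowPass
  have h0 : PySem.List.pyRepeat ([0] : List Int) N
      = (PySem.List.pyRange 0 N 1).map (fun _ => 0) := by
    rw [PySem.List.pyRepeat_singleton, List.map_const', PySem.List.length_pyRange_one]
    simp
  rw [h0, rowfold_exchange]
  apply List.map_congr_left
  intro j _
  simp [pvColSumA]

theorem foldl_min_const (x : Int) (t : List Int) (h : ∀ y ∈ t, y = x) :
    t.foldl min x = x := by
  induction t with
  | nil => rfl
  | cons y t ih =>
    simp only [List.foldl_cons]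
    rw [h y (by simp), min_self]
    exact ih (fun z hz => h z (by simp [hz]))

theorem foldl_max_const (x : Int) (t : List Int) (h : ∀ y ∈ t, y = x) :
    t.foldl max x = x := by
  induction t with
  | nil => rfl
  | cons y t ih =>
    simp only [List.foldl_cons]
    rw [h y (by simp), max_self]
    exact ih (fun z hz => h z (by simp [hz]))

-- min == max on a nonempty list says exactly that every element equals the head
theorem min_eq_max_iff (x : Int) (t : List Int) :
    PySem.List.min? (x :: t) (fun y => y) = PySem.List.max? (x :: t) (fun y => y)
      ↔ ∀ y ∈ x :: t, y = x := by
  constructor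
  · intro h y hy
    obtain ⟨m, hm⟩ : ∃ m, PySem.List.min? (x :: t) (fun y => y) = some m := by
      rw [PySem.List.min?_id_cons]; exact ⟨_, rfl⟩
    have hmin := PySem.List.min?_isMin hm
    have hmax := PySem.List.max?_isMax (h ▸ hm)
    have hx1 := hmin x (by simp)
    have hx2 := hmax x (by simp)
    have hy1 := hmin y hy
    have hy2 := hmax y hy
    omega
  · intro h
    rw [PySem.List.min?_id_cons, PySem.List.max?_id_cons,
        foldl_min_const x t (fun y hy => h y (by simp [hy])),
        foldl_max_const x t (fun y hy => h y (by simp [hy]))]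

theorem C3_spec_aux (N : Int) (Matrix : List (List Int)) : C3 N Matrix = C3_alt N Matrix := by
  unfold C3 C3_alt
  rw [pvRowPass_eq_colSums]
  by_cases hN : 0 < N
  · rw [PySem.List.pyRange_one_cons hN]
    simp only [List.map_cons, pvLoopA_eq_all, if_neg (by omega : ¬ N ≤ 0),
      min_eq_max_iff, PySem.List.pyGetD_zero_cons]
    by_cases hall : ∀ j ∈ PySem.List.pyRange 1 N 1, pvColSumA N Matrix j = pvColSumA N Matrix 0
    · rw [if_pos, if_pos]
      · intro y hy
        simp only [List.mem_cons, List.mem_map] at hy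
        rcases hy with h | ⟨j, hj, rfl⟩
        · exact h
        · exact hall j hj
      · simp only [List.all_eq_true, beq_iff_eq]; exact hall
    · rw [if_neg, if_neg]
      · intro hc
        refine hall (fun j hj => ?_)
        exact hc (pvColSumA N Matrix j) (List.mem_cons_of_mem _ (List.mem_map_of_mem hj))
      · simp only [List.all_eq_true, beq_iff_eq]; exact hall
  · rw [PySem.List.pyRange_one_eq_nil (by omega), PySem.List.pyRange_one_eq_nil (by omega)]
    simp only [List.map_nil, pvLoopA, if_pos (by omega : N ≤ 0)]
    unfold pvColSumA
    rw [PySem.List.pyRange_one_eq_nil (by omega)]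
    rfl

-- ===== VERDICT =====
theorem C3_spec : Claim_equal_C3 := by
  intro N Matrix _ _
  unfold Spec_C3
  exact C3_spec_aux N Matrix
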